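-- pv_equiv track=rewrite | github.com/Xrenya/Algorithms | Other/min_salary.py | salary
-- ===== SOURCE A (Python) =====
-- def salary(ratings) -> int:
--     n = len(ratings)
--     min_salary = [500] * n
--
--     for i in range(1, n):
--         if ratings[i] > ratings[i - 1]:
--             min_salary[i] = min_salary[i - 1] + 500
--
--     for i in range(n - 2, -1, -1):
--         if ratings[i] > ratings[i + 1]:
--             min_salary[i] = max(min_salary[i], min_salary[i + 1] + 500)
--     return sum(min_salary)
-- ===== SOURCE B (Python) =====
-- def salary(ratings) -> int:
--     # One forward pass, O(1) extra space: maintain up-run length, down-run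
--     # length and the up-run length at the last peak, adding each person's
--     # (incremental) pay to a running total.
--     if not ratings:
--         return 0
--     total = 500
--     up = down = peak = 0
--     prev = ratings[0]
--     for x in ratings[1:]:
--         total += 500
--         if x > prev:
--             up += 1
--             down = 0
--             peak = up
--             total += 500 * up
--         elif x == prev:
--             up = down = peak = 0
--         else:
--             up = 0
--             down += 1
--             total += 500 * (down - 1)
--             if down > peak:
--                 total += 500
--         prev = x
--     return total
-- ===== Notes on version B (the rewrite author's own statement) =====
-- stated objective: alternative
-- what changed: Replaces A's array of per-person salaries built by a forward pass plus a backward max-merge pass (and a final sum) with a single forward O(1)-space pass keeping only up-run/down-run lengths and the last peak's run length, adding each incremental payment to a running total.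
import Mathlib
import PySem

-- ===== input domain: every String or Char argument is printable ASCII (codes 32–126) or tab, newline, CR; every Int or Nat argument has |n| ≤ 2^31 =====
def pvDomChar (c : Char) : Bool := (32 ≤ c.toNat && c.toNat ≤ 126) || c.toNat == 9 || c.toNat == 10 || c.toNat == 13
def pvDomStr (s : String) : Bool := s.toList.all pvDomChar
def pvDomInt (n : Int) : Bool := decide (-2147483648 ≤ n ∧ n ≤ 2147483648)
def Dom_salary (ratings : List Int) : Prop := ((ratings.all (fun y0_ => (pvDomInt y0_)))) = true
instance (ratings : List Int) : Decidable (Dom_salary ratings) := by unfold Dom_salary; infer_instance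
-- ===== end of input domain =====

-- B replaces A's salary array (forward pass + backward max-merge pass + sum) with a single
-- forward O(1)-space pass keeping up-run/down-run/last-peak lengths and a running total.


-- ===== PORT A =====
-- All index reads/writes below are in range for the indices `range` produces, so the
-- total forms `pyGetD`/`pySetD` are exact here.
def fwdStep (ratings : List Int) (ms : List Int) (i : Int) : List Int :=
  if PySem.List.pyGetD ratings i 0 > PySem.List.pyGetD ratings (i - 1) 0 then
    PySem.List.pySetD ms i (PySem.List.pyGetD ms (i - 1) 0 + 500)
  else ms

def bwdStep (ratings : List Int) (ms : List Int) (i : Int) : List Int :=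
  if PySem.List.pyGetD ratings i 0 > PySem.List.pyGetD ratings (i + 1) 0 then
    PySem.List.pySetD ms i (max (PySem.List.pyGetD ms i 0) (PySem.List.pyGetD ms (i + 1) 0 + 500))
  else ms

def salary (ratings : List Int) : Int :=
  ((PySem.List.pyRange (PySem.List.len ratings - 2) (-1) (-1)).foldl (bwdStep ratings)
    ((PySem.List.pyRange 1 (PySem.List.len ratings) 1).foldl (fwdStep ratings)
      (PySem.List.pyRepeat [(500 : Int)] (PySem.List.len ratings)))).sum

-- ===== PORT B =====
-- state = (prev, up, down, peak, total); one step of Source B's loop body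
def stepB (st : Int × Int × Int × Int × Int) (x : Int) : Int × Int × Int × Int × Int :=
  let (prev, up, down, peak, total) := st
  if x > prev then (x, up + 1, 0, up + 1, total + 500 + 500 * (up + 1))
  else if x = prev then (x, 0, 0, 0, total + 500)
  else (x, 0, down + 1, peak, total + 500 + 500 * (down + 1 - 1) + (if down + 1 > peak then 500 else 0))

def salary_alt : List Int → Int
  | [] => 0
  | x :: xs => (xs.foldl stepB (x, 0, 0, 0, 500)).2.2.2.2

-- ===== PRECONDITION & SPEC =====
def Spec_salary (ratings : List Int) (out : Int) : Prop := out = salary_alt ratings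
instance (ratings : List Int) (out : Int) : Decidable (Spec_salary ratings out) := by unfold Spec_salary; infer_instance

-- ===== CLAIM (what is proved, stated in full; the proofs are below) =====
def Claim_equal_salary : Prop := ∀ (ratings : List Int), Dom_salary ratings → Spec_salary ratings (salary ratings)

-- ===== LEMMAS AND PROOFS =====

-- strictly-increasing run lengths (ups); downs are ups of the reversed list
def runsAux : Int → Int → List Int → List Int
  | _, _, [] => []
  | prev, run, x :: xs =>
    let r := if x > prev then run + 1 else 0
    r :: runsAux x r xs

def runs : List Int → List Int
  | [] => []
  | x :: xs => 0 :: runsAux x 0 xs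

-- per-index salary values A's two passes end with: 500 * (1 + max(up_i, down_i))
def finals (r : List Int) : List Int :=
  ((runs r).zip ((runs r.reverse).reverse)).map (fun p => 500 * (1 + max p.1 p.2))

-- forward-pass values: 500 * (run + 1)
def fsal (u : Int) : Int := 500 * (u + 1)

theorem length_runsAux (l : List Int) (p run : Int) : (runsAux p run l).length = l.length := by
  induction l generalizing p run with
  | nil => rfl
  | cons x xs ih => simp [runsAux, ih]

theorem length_runs (l : List Int) : (runs l).length = l.length := by
  cases l with
  | nil => rfl
  | cons x xs => simp [runs, length_runsAux]

theorem runsAux_nonneg (l : List Int) (p run : Int) (h : 0 ≤ run) :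
    ∀ v ∈ runsAux p run l, 0 ≤ v := by
  induction l generalizing p run with
  | nil => simp [runsAux]
  | cons x xs ih =>
    intro v hv
    simp only [runsAux, List.mem_cons] at hv
    rcases hv with rfl | hv
    · split <;> omega
    · exact ih x _ (by split <;> omega) v hv

theorem runs_nonneg (l : List Int) : ∀ v ∈ runs l, 0 ≤ v := by
  cases l with
  | nil => simp [runs]
  | cons x xs =>
    intro v hv
    simp only [runs, List.mem_cons] at hv
    rcases hv with rfl | hv
    · omega
    · exact runsAux_nonneg xs x 0 le_rfl v hv

theorem runsAux_getElem_succ (l : List Int) (p run : Int) (j : Nat) (h : j + 1 < l.length) :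
    (runsAux p run l)[j + 1]'(by rw [length_runsAux]; omega) =
      if l[j + 1] > l[j]'(by omega) then (runsAux p run l)[j]'(by rw [length_runsAux]; omega) + 1
      else 0 := by
  induction l generalizing p run j with
  | nil => simp at h
  | cons x xs ih =>
    cases j with
    | zero =>
      cases xs with
      | nil => simp at h
      | cons y ys => simp [runsAux]
    | succ j =>
      have h' : j + 1 < xs.length := by simp at h; omega
      simpa [runsAux] using ih x _ j h'

theorem runs_getElem_zero (l : List Int) (h : 0 < l.length) :
    (runs l)[0]'(by rw [length_runs]; omega) = 0 := by
  cases l with | nil => simp at h | cons x xs => rfl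

theorem runs_getElem_succ (l : List Int) (j : Nat) (h : j + 1 < l.length) :
    (runs l)[j + 1]'(by rw [length_runs]; omega) =
      if l[j + 1] > l[j]'(by omega) then (runs l)[j]'(by rw [length_runs]; omega) + 1 else 0 := by
  cases l with
  | nil => simp at h
  | cons x xs =>
    cases j with
    | zero =>
      cases xs with
      | nil => simp at h
      | cons y ys => simp [runs, runsAux]
    | succ j =>
      have h' : j + 1 < xs.length := by simp at h; omega
      simpa [runs] using runsAux_getElem_succ xs x 0 j h'

-- carry of the run state over a processed prefix
def carry : Int → Int → List Int → Int × Int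
  | p, run, [] => (p, run)
  | p, run, x :: xs => carry x (if x > p then run + 1 else 0) xs

theorem runsAux_append (ys : List Int) (p run : Int) (zs : List Int) :
    runsAux p run (ys ++ zs) = runsAux p run ys ++ runsAux (carry p run ys).1 (carry p run ys).2 zs := by
  induction ys generalizing p run with
  | nil => rfl
  | cons y ys ih => simp [runsAux, carry, ih]

theorem carry_spec (ys : List Int) (p run : Int) :
    (carry p run ys).1 = (p :: ys).getLast (by simp) ∧
    (carry p run ys).2 = (run :: runsAux p run ys).getLast (by simp) := by
  induction ys generalizing p run with
  | nil => simp [carry, runsAux]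
  | cons y ys ih =>
    obtain ⟨h1, h2⟩ := ih y (if y > p then run + 1 else 0)
    constructor
    · rw [carry, h1, List.getLast_cons_cons]
    · rw [carry, h2]
      simp only [runsAux, List.getLast_cons_cons]

theorem runs_snoc (l : List Int) (x : Int) (hne : l ≠ []) :
    runs (l ++ [x]) = runs l ++
      [if x > l.getLast hne then (runs l).getLast (by cases l with | nil => exact absurd rfl hne | cons a as => simp [runs]) + 1 else 0] := by
  cases l with
  | nil => exact absurd rfl hne
  | cons a as =>
    obtain ⟨h1, h2⟩ := carry_spec as a 0
    simp only [List.cons_append, runs, runsAux_append, runsAux, h1, h2]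

-- ===== A's forward loop =====

theorem fwd_inv (todo done : List Int) (hne : done ≠ []) :
    (PySem.List.pyRange (done.length : Int) (((done.length + todo.length : Nat) : Int)) 1).foldl
      (fwdStep (done ++ todo)) ((runs done).map fsal ++ List.replicate todo.length 500)
    = (runs (done ++ todo)).map fsal := by
  induction todo generalizing done with
  | nil =>
    rw [PySem.List.pyRange_one_eq_nil (by simp)]
    simp
  | cons x rest ih =>
    have hL1 : 1 ≤ done.length := List.length_pos_iff.mpr hne
    rw [PySem.List.pyRange_one_cons (by push_cast [List.length_cons]; omega), List.foldl_cons]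
    have hstep : fwdStep (done ++ x :: rest) ((runs done).map fsal ++ List.replicate (x :: rest).length 500) ((done.length : Int))
        = (runs (done ++ [x])).map fsal ++ List.replicate rest.length 500 := by
      have hrl : (done ++ x :: rest).length = done.length + rest.length + 1 := by simp; omega
      have hrd : (runs done).length = done.length := length_runs done
      have hmfl : ((runs done).map fsal).length = done.length := by simp [hrd]
      have hrdne : runs done ≠ [] := by
        cases done with | nil => exact absurd rfl hne | cons a as => simp [runs]
      have hx : (done ++ x :: rest).getD done.length 0 = x := by
        rw [List.getD_eq_getElem _ _ (by simp), List.getElem_append_right (by omega)]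
        simp
      have hprev : PySem.List.pyGetD (done ++ x :: rest) ((done.length : Int) - 1) 0 = done.getLast hne := by
        rw [show ((done.length : Int) - 1) = ((done.length - 1 : Nat) : Int) by omega]
        rw [PySem.List.pyGetD_natCast, List.getD_eq_getElem _ _ (by simp; omega),
            List.getElem_append_left (by omega), List.getLast_eq_getElem]
      have hmprev : PySem.List.pyGetD ((runs done).map fsal ++ List.replicate (x :: rest).length 500) ((done.length : Int) - 1) 0
          = fsal ((runs done).getLast hrdne) := by
        rw [show ((done.length : Int) - 1) = ((done.length - 1 : Nat) : Int) by omega]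
        rw [PySem.List.pyGetD_natCast, List.getD_eq_getElem _ _ (by simp [hmfl]; omega),
            List.getElem_append_left (by omega)]
        rw [List.getLast_eq_getElem]
        simp [hrd]
      unfold fwdStep
      rw [hprev, hmprev, PySem.List.pyGetD_natCast, hx]
      rw [runs_snoc done x hne]
      by_cases hc : x > done.getLast hne
      · rw [if_pos hc, if_pos hc, PySem.List.pySetD_natCast,
            List.set_append_right _ _ (by omega), hmfl, Nat.sub_self]
        simp only [List.length_cons, List.replicate_succ, List.set_cons_zero, List.map_append,
          List.map_cons, List.map_nil]
        rw [List.append_assoc]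
        simp [fsal]
        ring
      · rw [if_neg hc, if_neg hc]
        simp only [List.length_cons, List.replicate_succ, List.map_append, List.map_cons,
          List.map_nil]
        rw [List.append_assoc]
        simp [fsal]
    rw [hstep]
    have hrw : done ++ x :: rest = (done ++ [x]) ++ rest := by simp
    rw [hrw]
    have e1 : (done.length : Int) + 1 = (((done ++ [x]).length : Nat) : Int) := by simp
    have e2 : ((done.length + (x :: rest).length : Nat) : Int) = (((done ++ [x]).length + rest.length : Nat) : Int) := by
      simp; omega
    rw [e1, e2]
    exact ih (done ++ [x]) (by simp)

theorem fwd_eq (r : List Int) :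
    (PySem.List.pyRange 1 (PySem.List.len r) 1).foldl (fwdStep r) (PySem.List.pyRepeat [(500 : Int)] (PySem.List.len r))
    = (runs r).map fsal := by
  cases r with
  | nil =>
    rw [show PySem.List.len ([] : List Int) = 0 by rfl, PySem.List.pyRange_one_eq_nil (by omega)]
    rfl
  | cons a as =>
    have h := fwd_inv as [a] (by simp)
    have e0 : PySem.List.len (a :: as) = (((1 : Nat) + as.length : Nat) : Int) := by
      simp [PySem.List.len_eq]; omega
    have einit : PySem.List.pyRepeat [(500 : Int)] (PySem.List.len (a :: as))
        = (runs [a]).map fsal ++ List.replicate as.length 500 := by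
      rw [PySem.List.pyRepeat_singleton]
      simp only [runs, runsAux, List.map_cons, List.map_nil, fsal]
      rw [show PySem.List.len (a :: as) = ((as.length + 1 : Nat) : Int) by simp [PySem.List.len_eq]]
      rw [show (((as.length + 1 : Nat) : Int)).toNat = as.length + 1 by omega]
      rw [List.replicate_succ]
      norm_num
    rw [einit, e0]
    simpa using h

-- ===== A's backward loop =====

theorem finals_length (r : List Int) : (finals r).length = r.length := by
  simp [finals, length_runs]

theorem finals_getElem (r : List Int) (j : Nat) (h : j < r.length) :
    (finals r)[j]'(by rw [finals_length]; omega) =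
      500 * (1 + max ((runs r)[j]'(by rw [length_runs]; omega))
                    (((runs r.reverse).reverse)[j]'(by rw [List.length_reverse, length_runs, List.length_reverse]; omega))) := by
  simp [finals]

theorem downs_getElem_last (r : List Int) (h : r ≠ []) :
    ((runs r.reverse).reverse)[r.length - 1]'(by rw [List.length_reverse, length_runs, List.length_reverse]; exact Nat.sub_lt (List.length_pos_iff.mpr h) one_pos) = 0 := by
  have hn : 0 < r.length := List.length_pos_iff.mpr h
  rw [List.getElem_reverse]
  have e : (runs r.reverse).length - 1 - (r.length - 1) = 0 := by
    rw [length_runs, List.length_reverse]; omega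
  simp_rw [e]
  exact runs_getElem_zero _ (by simp; omega)

theorem downs_getElem (r : List Int) (j : Nat) (h : j + 1 < r.length) :
    ((runs r.reverse).reverse)[j]'(by rw [List.length_reverse, length_runs, List.length_reverse]; omega) =
      if r[j]'(by omega) > r[j + 1] then ((runs r.reverse).reverse)[j + 1]'(by rw [List.length_reverse, length_runs, List.length_reverse]; omega) + 1 else 0 := by
  rw [List.getElem_reverse, List.getElem_reverse]
  have e1 : (runs r.reverse).length - 1 - j = (r.length - 2 - j) + 1 := by
    rw [length_runs, List.length_reverse]; omega
  have e2 : (runs r.reverse).length - 1 - (j + 1) = r.length - 2 - j := by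
    rw [length_runs, List.length_reverse]; omega
  simp_rw [e1, e2]
  rw [runs_getElem_succ r.reverse (r.length - 2 - j) (by simp; omega)]
  have e3 : r.length - 1 - (r.length - 2 - j + 1) = j := by omega
  have e4 : r.length - 1 - (r.length - 2 - j) = j + 1 := by omega
  simp_rw [List.getElem_reverse, e3, e4]

theorem bwd_core (r : List Int) (j : Nat) (h : j + 1 < r.length) :
    bwdStep r (((runs r).map fsal).take (j + 1) ++ (finals r).drop (j + 1)) (j : Int)
    = ((runs r).map fsal).take j ++ (finals r).drop j := by
  have hfw : ((runs r).map fsal).length = r.length := by simp [length_runs]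
  have hfin := finals_length r
  have hj : j < r.length := by omega
  have hj1 : j + 1 < r.length := h
  have htake : ((runs r).map fsal).take (j + 1) =
      ((runs r).map fsal).take j ++ [((runs r).map fsal)[j]'(by omega)] := by
    rw [List.take_append_getElem]
  have hmsj : (((runs r).map fsal).take (j + 1) ++ (finals r).drop (j + 1)).getD j 0 =
      ((runs r).map fsal)[j]'(by omega) := by
    rw [List.getD_eq_getElem _ _ (by simp [hfw, hfin]; omega),
        List.getElem_append_left (by simp [hfw]; omega), List.getElem_take]
  have hmsj1 : (((runs r).map fsal).take (j + 1) ++ (finals r).drop (j + 1)).getD (j + 1) 0 =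
      (finals r)[j + 1]'(by omega) := by
    rw [List.getD_eq_getElem _ _ (by simp [hfw, hfin]; omega),
        List.getElem_append_right (by simp [hfw])]
    simp only [List.length_take, hfw, List.getElem_drop]
    simp_rw [show min (j + 1) r.length = j + 1 from by omega]
    simp
  have hufj : ((runs r).map fsal)[j]'(by omega) = 500 * ((runs r)[j]'(by rw [length_runs]; omega) + 1) := by
    simp [fsal]
  have hfinj := finals_getElem r j hj
  have hfinj1 := finals_getElem r (j + 1) hj1
  have hup_nonneg : 0 ≤ (runs r)[j]'(by rw [length_runs]; omega) :=
    runs_nonneg r _ (List.getElem_mem _)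
  have hdn_nonneg : 0 ≤ ((runs r.reverse).reverse)[j + 1]'(by rw [List.length_reverse, length_runs, List.length_reverse]; omega) := by
    apply runs_nonneg r.reverse
    exact List.mem_reverse.mp (List.getElem_mem _)
  have hdj := downs_getElem r j h
  unfold bwdStep
  rw [show ((j : Int) + 1) = ((j + 1 : Nat) : Int) by push_cast; ring]
  simp only [PySem.List.pyGetD_natCast, PySem.List.pySetD_natCast]
  rw [List.getD_eq_getElem _ _ hj, List.getD_eq_getElem _ _ hj1, hmsj, hmsj1]
  by_cases hc : r[j + 1] < r[j]'(by omega)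
  · rw [if_pos hc]
    have hup1 : (runs r)[j + 1]'(by rw [length_runs]; omega) = 0 := by
      rw [runs_getElem_succ r j h, if_neg (by omega)]
    have hval : max (((runs r).map fsal)[j]'(by omega)) ((finals r)[j + 1]'(by omega) + 500) =
        (finals r)[j]'(by omega) := by
      rw [hufj, hfinj, hfinj1, hup1, hdj, if_pos hc]
      omega
    rw [hval]
    rw [List.set_append_left _ _ (by simp [hfw]; omega), htake,
        List.set_append_right _ _ (by simp [hfw])]
    simp only [List.length_take, hfw, Nat.min_eq_left (by omega : j ≤ r.length), Nat.sub_self,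
      List.set_cons_zero]
    rw [List.append_assoc]
    simp only [List.singleton_append]
    rw [List.getElem_cons_drop]
  · rw [if_neg hc]
    have hdj0 : ((runs r.reverse).reverse)[j]'(by rw [List.length_reverse, length_runs, List.length_reverse]; omega) = 0 := by
      rw [hdj, if_neg (by omega)]
    have hval : ((runs r).map fsal)[j]'(by omega) = (finals r)[j]'(by omega) := by
      rw [hufj, hfinj, hdj0]; omega
    rw [htake, List.append_assoc]
    simp only [List.singleton_append]
    rw [hval, List.getElem_cons_drop]

theorem fw_eq_finals_at_last (r : List Int) (h : r ≠ []) :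
    (runs r).map fsal = ((runs r).map fsal).take (r.length - 1) ++ (finals r).drop (r.length - 1) := by
  have hn : 0 < r.length := List.length_pos_iff.mpr h
  have hfw : ((runs r).map fsal).length = r.length := by simp [length_runs]
  have hfin := finals_length r
  have hlast : ((runs r).map fsal)[r.length - 1]'(by omega) = (finals r)[r.length - 1]'(by omega) := by
    rw [finals_getElem r (r.length - 1) (by omega), downs_getElem_last r h]
    have hup : 0 ≤ (runs r)[r.length - 1]'(by rw [length_runs]; omega) :=
      runs_nonneg r _ (List.getElem_mem _)
    simp only [List.getElem_map, fsal]
    omega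
  conv_lhs => rw [← List.take_append_drop (r.length - 1) ((runs r).map fsal)]
  congr 1
  rw [← List.getElem_cons_drop (show r.length - 1 < ((runs r).map fsal).length by omega),
      ← List.getElem_cons_drop (show r.length - 1 < (finals r).length by omega), hlast]
  congr 1
  rw [List.drop_eq_nil_of_le (by omega), List.drop_eq_nil_of_le (by omega)]

theorem bwd_inv (r : List Int) (j : Nat) (h : j + 2 ≤ r.length) :
    (PySem.List.pyRange (j : Int) (-1) (-1)).foldl (bwdStep r)
      (((runs r).map fsal).take (j + 1) ++ (finals r).drop (j + 1))
    = finals r := by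
  induction j with
  | zero =>
    rw [show ((0 : Nat) : Int) = 0 by rfl, PySem.List.pyRange_neg_one_cons (by omega),
        PySem.List.pyRange_neg_one_eq_nil (by omega), List.foldl_cons, List.foldl_nil]
    have hc := bwd_core r 0 (by omega)
    rw [show ((0 : Nat) : Int) = 0 by rfl] at hc
    simpa using hc
  | succ j ih =>
    rw [PySem.List.pyRange_neg_one_cons (by omega), List.foldl_cons]
    rw [bwd_core r (j + 1) (by omega)]
    rw [show ((j + 1 : Nat) : Int) - 1 = ((j : Nat) : Int) by push_cast; ring]
    exact ih (by omega)

-- A's result is the sum of the per-index finals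
theorem salary_eq_finals (r : List Int) : salary r = (finals r).sum := by
  cases r with
  | nil => rfl
  | cons a as =>
    unfold salary
    rw [fwd_eq (a :: as)]
    congr 1
    have hne : (a :: as) ≠ [] := by simp
    rw [show PySem.List.len (a :: as) = (((a :: as).length : Nat) : Int) by simp [PySem.List.len_eq]]
    by_cases h2 : 2 ≤ (a :: as).length
    · rw [show (((a :: as).length : Nat) : Int) - 2 = (((a :: as).length - 2 : Nat) : Int) by omega]
      rw [fw_eq_finals_at_last (a :: as) hne]
      rw [show (a :: as).length - 1 = ((a :: as).length - 2) + 1 by omega]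
      exact bwd_inv (a :: as) ((a :: as).length - 2) (by omega)
    · have h1 : (a :: as).length = 1 := by simp only [List.length_cons] at h2 ⊢; omega
      rw [h1]
      rw [show (((1 : Nat) : Int) - 2) = -1 by rfl, PySem.List.pyRange_neg_one_eq_nil (by omega),
          List.foldl_nil]
      rw [fw_eq_finals_at_last (a :: as) hne, h1]
      simp

-- ===== B's single pass =====

def fF (u d : Int) : Int := 500 * (1 + max u d)

def DNS (l : List Int) : List Int := (runs l.reverse).reverse

-- length of the strictly increasing prefix chain (used on the reversed list)
def chainN : List Int → Nat
  | x :: y :: t => if x < y then chainN (y :: t) + 1 else 0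
  | _ => 0

def decLen (l : List Int) : Nat := chainN l.reverse

def peakOf (l : List Int) : Int := (runs l).getD (l.length - 1 - decLen l) 0

def SR (l : List Int) : Int :=
  ∑ j ∈ Finset.range l.length, fF ((runs l).getD j 0) ((DNS l).getD j 0)

theorem zipsum_eq_range (A B : List Int) (h : A.length = B.length) :
    ((A.zip B).map (fun p => fF p.1 p.2)).sum
      = ∑ j ∈ Finset.range A.length, fF (A.getD j 0) (B.getD j 0) := by
  induction A generalizing B with
  | nil => simp
  | cons a A ih =>
    cases B with
    | nil => simp at h
    | cons b B =>
      rw [List.zip_cons_cons, List.map_cons, List.sum_cons, List.length_cons,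
        Finset.sum_range_succ']
      simp only [List.getD_cons_succ, List.getD_cons_zero]
      rw [ih B (by simpa using h)]
      ring

theorem sum_zip_eq_SR (l : List Int) : (finals l).sum = SR l := by
  have h := zipsum_eq_range (runs l) (DNS l)
    (by simp [DNS, length_runs])
  unfold finals SR
  simp only [fF] at h
  rw [show (runs l.reverse).reverse = DNS l from rfl, h, length_runs]
  simp [fF]

theorem chainN_lt : ∀ (rl : List Int), rl ≠ [] → chainN rl < rl.length
  | [_], _ => by simp [chainN]
  | x :: y :: t, _ => by
    have := chainN_lt (y :: t) (by simp)
    simp only [chainN, List.length_cons] at *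
    split <;> omega

theorem chainN_inc : ∀ (rl : List Int) (i : Nat), i < chainN rl →
    rl.getD i 0 < rl.getD (i + 1) 0
  | [], i, h => by simp [chainN] at h
  | [_], i, h => by simp [chainN] at h
  | x :: y :: t, 0, h => by
    simp only [chainN] at h
    split at h
    · simpa using ‹x < y›
    · omega
  | x :: y :: t, i + 1, h => by
    simp only [chainN] at h
    split at h
    · have := chainN_inc (y :: t) i (by omega)
      simpa using this
    · omega

theorem chainN_break : ∀ (rl : List Int), chainN rl + 1 < rl.length →
    ¬ rl.getD (chainN rl) 0 < rl.getD (chainN rl + 1) 0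
  | [], h => by simp [chainN] at h
  | [_], h => by simp [chainN] at h
  | x :: y :: t, h => by
    by_cases hxy : x < y
    · simp only [chainN, if_pos hxy, List.length_cons] at h ⊢
      have := chainN_break (y :: t) (by simp only [List.length_cons]; omega)
      simpa using this
    · simp only [chainN, if_neg hxy] at h ⊢
      simpa using hxy

theorem getLastD_rev (l : List Int) (y : Int) (t : List Int) (hyt : l.reverse = y :: t) :
    l.getLastD 0 = y := by
  have h1 : l.getLast? = some y := by
    rw [← List.head?_reverse, hyt]; rfl
  rw [List.getLastD_eq_getLast?, h1]
  rfl

theorem getD_rev (l : List Int) (i : Nat) (h : i < l.length) :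
    l.reverse.getD i 0 = l.getD (l.length - 1 - i) 0 := by
  rw [List.getD_eq_getElem _ _ (by simpa using h), List.getD_eq_getElem _ _ (by omega),
    List.getElem_reverse]

theorem length_DNS (l : List Int) : (DNS l).length = l.length := by
  simp [DNS, length_runs]

theorem dns_getD_last (l : List Int) (hne : l ≠ []) : (DNS l).getD (l.length - 1) 0 = 0 := by
  rw [List.getD_eq_getElem _ _ (by rw [length_DNS]; exact Nat.sub_lt (List.length_pos_iff.mpr hne) one_pos)]
  exact downs_getElem_last l hne

theorem dns_getD_rec (l : List Int) (j : Nat) (h : j + 1 < l.length) :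
    (DNS l).getD j 0 =
      if l.getD j 0 > l.getD (j + 1) 0 then (DNS l).getD (j + 1) 0 + 1 else 0 := by
  rw [List.getD_eq_getElem (DNS l) 0 (n := j) (by rw [length_DNS]; omega),
    List.getD_eq_getElem (DNS l) 0 (n := j + 1) (by rw [length_DNS]; omega),
    List.getD_eq_getElem l 0 (n := j) (by omega),
    List.getD_eq_getElem l 0 (n := j + 1) (by omega)]
  exact downs_getElem l j h

theorem ups_getD_succ (l : List Int) (j : Nat) (h : j + 1 < l.length) :
    (runs l).getD (j + 1) 0 =
      if l.getD (j + 1) 0 > l.getD j 0 then (runs l).getD j 0 + 1 else 0 := by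
  rw [List.getD_eq_getElem (runs l) 0 (n := j) (by rw [length_runs]; omega),
    List.getD_eq_getElem (runs l) 0 (n := j + 1) (by rw [length_runs]; omega),
    List.getD_eq_getElem l 0 (n := j) (by omega),
    List.getD_eq_getElem l 0 (n := j + 1) (by omega)]
  exact runs_getElem_succ l j h

-- forward translations
theorem desc_lt (l : List Int) (j : Nat) (hlo : l.length - 1 - decLen l ≤ j)
    (hhi : j + 1 ≤ l.length - 1) : l.getD (j + 1) 0 < l.getD j 0 := by
  have hm : j + 2 ≤ l.length := by omega
  have hdm : decLen l < l.length := by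
    have := chainN_lt l.reverse (by intro hc; simp [List.reverse_eq_nil_iff.mp hc] at hm)
    simpa [decLen] using this
  have hi : l.length - 2 - j < decLen l := by omega
  have h2 := chainN_inc l.reverse (l.length - 2 - j) (by simpa [decLen] using hi)
  rw [getD_rev l _ (by omega), getD_rev l _ (by omega)] at h2
  rw [show l.length - 1 - (l.length - 2 - j) = j + 1 by omega] at h2
  rw [show l.length - 1 - (l.length - 2 - j + 1) = j by omega] at h2
  exact h2

theorem break_fwd (l : List Int) (h : 1 ≤ l.length - 1 - decLen l) :
    ¬ l.getD (l.length - 1 - decLen l) 0 < l.getD (l.length - 2 - decLen l) 0 := by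
  unfold decLen at h ⊢
  have hd : chainN l.reverse + 1 < l.length := by omega
  have h2 := chainN_break l.reverse (by simpa using hd)
  rw [getD_rev l _ (by omega), getD_rev l _ (by omega)] at h2
  rw [show l.length - 1 - (chainN l.reverse + 1) = l.length - 2 - chainN l.reverse by omega] at h2
  exact h2

theorem dns_desc_aux (l : List Int) (hne : l ≠ []) :
    ∀ k, k ≤ decLen l → k < l.length → (DNS l).getD (l.length - 1 - k) 0 = (k : Int)
  | 0, _, _ => by simpa using dns_getD_last l hne
  | k + 1, hk, hkm => by
    have e : l.length - 1 - (k + 1) + 1 = l.length - 1 - k := by omega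
    rw [dns_getD_rec l _ (by omega), e,
      if_pos (by
        have := desc_lt l (l.length - 1 - (k + 1)) (by omega) (by omega)
        rw [e] at this
        exact this),
      dns_desc_aux l hne k (by omega) (by omega)]
    push_cast; ring

theorem dns_desc (l : List Int) (j : Nat) (hne : l ≠ []) (hlo : l.length - 1 - decLen l ≤ j)
    (hhi : j < l.length) : (DNS l).getD j 0 = ((l.length - 1 - j : Nat) : Int) := by
  have hdm : decLen l < l.length := by
    have := chainN_lt l.reverse (by simpa using hne)
    simpa [decLen] using this
  have := dns_desc_aux l hne (l.length - 1 - j) (by omega) (by omega)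
  rw [show l.length - 1 - (l.length - 1 - j) = j by omega] at this
  exact this

theorem ups_desc0 (l : List Int) (j : Nat) (hlo : l.length - decLen l ≤ j)
    (hhi : j < l.length) : (runs l).getD j 0 = 0 := by
  have hdm : decLen l < l.length := by
    have hne : l ≠ [] := by intro hc; subst hc; simp at hhi
    have := chainN_lt l.reverse (by simpa using hne)
    simpa [decLen] using this
  have hj1 : 1 ≤ j := by omega
  obtain ⟨j', rfl⟩ : ∃ j', j = j' + 1 := ⟨j - 1, by omega⟩
  rw [ups_getD_succ l j' (by omega),
    if_neg (by
      have := desc_lt l j' (by omega) (by omega)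
      omega)]

theorem getLast_eq_getLastD (l : List Int) (h : l ≠ []) : l.getLast h = l.getLastD 0 := by
  rw [List.getLastD_eq_getLast?, List.getLast?_eq_some_getLast h]
  rfl

theorem getD_append_left' (A B : List Int) (j : Nat) (h : j < A.length) :
    (A ++ B).getD j 0 = A.getD j 0 := by
  rw [List.getD_eq_getElem (A ++ B) 0 (n := j) (by simp; omega),
    List.getD_eq_getElem A 0 (n := j) h, List.getElem_append_left h]

theorem getD_append_length (A : List Int) (v : Int) :
    (A ++ [v]).getD A.length 0 = v := by
  rw [List.getD_eq_getElem (A ++ [v]) 0 (n := A.length) (by simp),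
    List.getElem_append_right (le_refl _)]
  simp

theorem decLen_snoc (l : List Int) (x : Int) (hne : l ≠ []) :
    decLen (l ++ [x]) = if x < l.getLastD 0 then decLen l + 1 else 0 := by
  obtain ⟨y, t, hyt⟩ := List.exists_cons_of_ne_nil ((by simpa using hne) : l.reverse ≠ [])
  have hy := getLastD_rev l y t hyt
  unfold decLen
  rw [List.reverse_append, List.reverse_singleton, List.singleton_append, hyt, hy]
  rw [show chainN (x :: y :: t) = if x < y then chainN (y :: t) + 1 else 0 from rfl, ← hyt]

theorem dns_snoc_ge (l : List Int) (x : Int) (hne : l ≠ []) (hx : ¬ x < l.getLastD 0) :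
    DNS (l ++ [x]) = DNS l ++ [0] := by
  obtain ⟨y, t, hyt⟩ := List.exists_cons_of_ne_nil ((by simpa using hne) : l.reverse ≠ [])
  have hy := getLastD_rev l y t hyt
  unfold DNS
  rw [List.reverse_append, List.reverse_singleton, List.singleton_append, hyt]
  have hstep : runs (x :: y :: t) = 0 :: runs (y :: t) := by
    simp only [runs, runsAux]
    rw [if_neg (by rw [hy] at hx; omega)]
  rw [hstep, List.reverse_cons]

theorem dns_snoc_lo_aux (l : List Int) (x : Int) (hne : l ≠ []) (hx : x < l.getLastD 0)
    (h1 : 1 ≤ l.length - 1 - decLen l) :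
    ∀ k, k ≤ l.length - 2 - decLen l →
      (DNS (l ++ [x])).getD (l.length - 2 - decLen l - k) 0
        = (DNS l).getD (l.length - 2 - decLen l - k) 0
  | 0, hk => by
    have hrec' := dns_getD_rec (l ++ [x]) (l.length - 2 - decLen l)
      (by simp only [List.length_append, List.length_cons, List.length_nil]; omega)
    have hrec := dns_getD_rec l (l.length - 2 - decLen l) (by omega)
    rw [Nat.sub_zero, hrec', hrec,
      getD_append_left' l [x] _ (by omega),
      getD_append_left' l [x] _ (by omega)]
    rw [show l.length - 2 - decLen l + 1 = l.length - 1 - decLen l by omega] at *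
    have hbrk := break_fwd l h1
    rw [if_neg (by omega), if_neg (by omega)]
  | k + 1, hk => by
    have ih := dns_snoc_lo_aux l x hne hx h1 k (by omega)
    have hrec' := dns_getD_rec (l ++ [x]) (l.length - 2 - decLen l - (k + 1))
      (by simp only [List.length_append, List.length_cons, List.length_nil]; omega)
    have hrec := dns_getD_rec l (l.length - 2 - decLen l - (k + 1)) (by omega)
    rw [hrec', hrec,
      getD_append_left' l [x] _ (by omega),
      getD_append_left' l [x] _ (by omega)]
    rw [show l.length - 2 - decLen l - (k + 1) + 1 = l.length - 2 - decLen l - k by omega] at *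
    rw [ih]

theorem dns_snoc_lo (l : List Int) (x : Int) (hne : l ≠ []) (hx : x < l.getLastD 0)
    (j : Nat) (hj : j < l.length - 1 - decLen l) :
    (DNS (l ++ [x])).getD j 0 = (DNS l).getD j 0 := by
  have h1 : 1 ≤ l.length - 1 - decLen l := by omega
  have := dns_snoc_lo_aux l x hne hx h1 (l.length - 2 - decLen l - j) (by omega)
  rw [show l.length - 2 - decLen l - (l.length - 2 - decLen l - j) = j by omega] at this
  exact this

theorem runs_snoc' (l : List Int) (x : Int) (hne : l ≠ []) :
    runs (l ++ [x]) = runs l ++ [if x > l.getLastD 0 then (runs l).getLastD 0 + 1 else 0] := by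
  have hrne : runs l ≠ [] := by
    cases l with | nil => exact absurd rfl hne | cons a as => simp [runs]
  rw [runs_snoc l x hne, getLast_eq_getLastD l hne, getLast_eq_getLastD (runs l) hrne]

theorem fF_succ (P D : Int) : fF P (D + 1) = fF P D + (if D + 1 > P then 500 else 0) := by
  simp only [fF]
  split <;> omega

theorem SR_snoc (l : List Int) (x : Int) (hne : l ≠ []) :
    SR (l ++ [x]) =
      if x > l.getLastD 0 then SR l + 500 + 500 * ((runs l).getLastD 0 + 1)
      else if x = l.getLastD 0 then SR l + 500
      else SR l + 500 + 500 * ((decLen l : Int)) +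
        (if ((decLen l : Int)) + 1 > peakOf l then 500 else 0) := by
  have hm : 1 ≤ l.length := List.length_pos_iff.mpr hne
  have hrne : runs l ≠ [] := by
    cases l with | nil => exact absurd rfl hne | cons a as => simp [runs]
  have hrlen : (runs l).length = l.length := length_runs l
  have hdlen : (DNS l).length = l.length := length_DNS l
  have hlen' : (l ++ [x]).length = l.length + 1 := by simp
  have hU : 0 ≤ (runs l).getLastD 0 := by
    rw [← getLast_eq_getLastD (runs l) hrne]
    exact runs_nonneg l _ (List.getLast_mem hrne)
  by_cases hlt : x < l.getLastD 0
  case neg =>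
    -- x ≥ last: no descent extension
    have hups := runs_snoc' l x hne
    have hdns := dns_snoc_ge l x hne hlt
    have hlast_u : (runs (l ++ [x])).getD l.length 0
        = (if x > l.getLastD 0 then (runs l).getLastD 0 + 1 else 0) := by
      have h1 := getD_append_length (runs l) (if x > l.getLastD 0 then (runs l).getLastD 0 + 1 else 0)
      rw [hrlen] at h1
      rw [hups, h1]
    have hlast_d : (DNS (l ++ [x])).getD l.length 0 = 0 := by
      have h1 := getD_append_length (DNS l) (0 : Int)
      rw [hdlen] at h1
      rw [hdns, h1]
    have hsame : ∀ j ∈ Finset.range l.length,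
        fF ((runs (l ++ [x])).getD j 0) ((DNS (l ++ [x])).getD j 0)
          = fF ((runs l).getD j 0) ((DNS l).getD j 0) := by
      intro j hj
      rw [Finset.mem_range] at hj
      rw [hups, hdns, getD_append_left' _ _ _ (by omega), getD_append_left' _ _ _ (by omega)]
    unfold SR
    rw [hlen', Finset.sum_range_succ, hlast_u, hlast_d, Finset.sum_congr rfl hsame]
    by_cases hgt : x > l.getLastD 0
    · rw [if_pos hgt, if_pos hgt]
      simp only [fF]
      omega
    · rw [if_neg hgt, if_neg hgt, if_pos (by omega)]
      simp only [fF]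
      omega
  case pos =>
    -- descent case
    rw [if_neg (by omega), if_neg (by omega)]
    have hd : decLen l < l.length := by
      have := chainN_lt l.reverse (by simpa using hne)
      simpa [decLen] using this
    have hne' : (l ++ [x]) ≠ [] := by simp
    have hd' : decLen (l ++ [x]) = decLen l + 1 := by
      rw [decLen_snoc l x hne, if_pos hlt]
    have hups : runs (l ++ [x]) = runs l ++ [0] := by
      rw [runs_snoc' l x hne, if_neg (by omega)]
    have hup_left : ∀ j, j < l.length → (runs (l ++ [x])).getD j 0 = (runs l).getD j 0 := by
      intro j hj
      rw [hups, getD_append_left' _ _ _ (by omega)]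
    have hlast_u : (runs (l ++ [x])).getD l.length 0 = 0 := by
      have h1 := getD_append_length (runs l) (0 : Int)
      rw [hrlen] at h1
      rw [hups, h1]
    have hlast_d : (DNS (l ++ [x])).getD l.length 0 = 0 := by
      have := dns_desc (l ++ [x]) l.length hne' (by rw [hlen', hd']; omega) (by rw [hlen']; omega)
      rw [hlen'] at this
      simpa using this
    have hlow : ∀ j ∈ Finset.Ico 0 (l.length - 1 - decLen l),
        fF ((runs (l ++ [x])).getD j 0) ((DNS (l ++ [x])).getD j 0)
          = fF ((runs l).getD j 0) ((DNS l).getD j 0) := by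
      intro j hj
      rw [Finset.mem_Ico] at hj
      rw [hup_left j (by omega), dns_snoc_lo l x hne hlt j (by omega)]
    have hmid : ∀ j ∈ Finset.Ico (l.length - decLen l) l.length,
        fF ((runs (l ++ [x])).getD j 0) ((DNS (l ++ [x])).getD j 0)
          = fF ((runs l).getD j 0) ((DNS l).getD j 0) + 500 := by
      intro j hj
      rw [Finset.mem_Ico] at hj
      rw [hup_left j (by omega), ups_desc0 l j (by omega) (by omega),
        dns_desc (l ++ [x]) j hne' (by rw [hlen', hd']; omega) (by rw [hlen']; omega),
        dns_desc l j hne (by omega) (by omega), hlen']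
      simp only [fF]
      omega
    have hpeak_new :
        fF ((runs (l ++ [x])).getD (l.length - 1 - decLen l) 0)
           ((DNS (l ++ [x])).getD (l.length - 1 - decLen l) 0)
          = fF (peakOf l) ((decLen l : Int) + 1) := by
      rw [hup_left _ (by omega),
        dns_desc (l ++ [x]) _ hne' (by rw [hlen', hd']; omega) (by rw [hlen']; omega), hlen',
        show (l.length + 1 - 1 - (l.length - 1 - decLen l) : Nat) = decLen l + 1 by omega]
      unfold peakOf
      push_cast
      ring_nf
    have hpeak_old :
        fF ((runs l).getD (l.length - 1 - decLen l) 0) ((DNS l).getD (l.length - 1 - decLen l) 0)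
          = fF (peakOf l) ((decLen l : Int)) := by
      rw [dns_desc l _ hne (le_refl _) (by omega),
        show (l.length - 1 - (l.length - 1 - decLen l) : Nat) = decLen l by omega]
      unfold peakOf
      rfl
    unfold SR
    rw [hlen', Finset.sum_range_succ, hlast_u, hlast_d]
    rw [Finset.range_eq_Ico,
      ← Finset.sum_Ico_consecutive _ (Nat.zero_le (l.length - 1 - decLen l)) (by omega),
      ← Finset.sum_Ico_consecutive (f := fun j => fF ((runs l).getD j 0) ((DNS l).getD j 0))
        (Nat.zero_le (l.length - 1 - decLen l)) (by omega),
      Finset.sum_eq_sum_Ico_succ_bot (by omega : l.length - 1 - decLen l < l.length),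
      Finset.sum_eq_sum_Ico_succ_bot (by omega : l.length - 1 - decLen l < l.length)
        (fun j => fF ((runs l).getD j 0) ((DNS l).getD j 0)),
      show l.length - 1 - decLen l + 1 = l.length - decLen l by omega,
      Finset.sum_congr rfl hlow, Finset.sum_congr rfl hmid, hpeak_new, hpeak_old,
      Finset.sum_add_distrib, Finset.sum_const, Nat.card_Ico,
      show l.length - (l.length - decLen l) = decLen l by omega,
      fF_succ (peakOf l) ((decLen l : Int)), nsmul_eq_mul]
    have hf00 : fF 0 0 = 500 := by decide
    rw [hf00]
    ring

theorem peakOf_snoc (l : List Int) (x : Int) (hne : l ≠ []) :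
    peakOf (l ++ [x]) =
      if x > l.getLastD 0 then (runs l).getLastD 0 + 1
      else if x = l.getLastD 0 then 0
      else peakOf l := by
  have hm : 1 ≤ l.length := List.length_pos_iff.mpr hne
  have hrlen : (runs l).length = l.length := length_runs l
  have hlen' : (l ++ [x]).length = l.length + 1 := by simp
  have hd : decLen l < l.length := by
    have := chainN_lt l.reverse (by simpa using hne)
    simpa [decLen] using this
  by_cases hlt : x < l.getLastD 0
  · rw [if_neg (by omega), if_neg (by omega)]
    have hd' : decLen (l ++ [x]) = decLen l + 1 := by
      rw [decLen_snoc l x hne, if_pos hlt]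
    have hups : runs (l ++ [x]) = runs l ++ [0] := by
      rw [runs_snoc' l x hne, if_neg (by omega)]
    unfold peakOf
    rw [hlen', hd', hups,
      show (l.length + 1 - 1 - (decLen l + 1) : Nat) = l.length - 1 - decLen l by omega,
      getD_append_left' _ _ _ (by omega)]
  · have hd' : decLen (l ++ [x]) = 0 := by
      rw [decLen_snoc l x hne, if_neg hlt]
    have hups := runs_snoc' l x hne
    unfold peakOf
    rw [hlen', hd', hups, Nat.sub_zero, Nat.add_sub_cancel]
    have h1 := getD_append_length (runs l) (if x > l.getLastD 0 then (runs l).getLastD 0 + 1 else 0)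
    rw [hrlen] at h1
    rw [h1]
    by_cases hgt : x > l.getLastD 0
    · rw [if_pos hgt, if_pos hgt]
    · rw [if_neg hgt, if_neg hgt, if_pos (by omega)]

theorem getLastD_snoc (A : List Int) (v : Int) : (A ++ [v]).getLastD 0 = v := by
  rw [List.getLastD_eq_getLast?, List.getLast?_eq_some_getLast (by simp)]
  simp

theorem foldB_inv (a : Int) (as : List Int) :
    as.foldl stepB (a, 0, 0, 0, 500) =
      ((a :: as).getLastD 0, (runs (a :: as)).getLastD 0, ((decLen (a :: as) : Nat) : Int),
        peakOf (a :: as), SR (a :: as)) := by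
  induction as using List.reverseRecOn with
  | nil =>
    simp [runs, runsAux, DNS, SR, decLen, chainN, peakOf, fF]
  | append_singleton as x ih =>
    have hne : (a :: as) ≠ [] := by simp
    rw [show a :: (as ++ [x]) = (a :: as) ++ [x] from rfl, List.foldl_append, ih,
      List.foldl_cons, List.foldl_nil]
    have hLast : ((a :: as) ++ [x]).getLastD 0 = x := getLastD_snoc _ x
    have hU := runs_snoc' (a :: as) x hne
    have hD := decLen_snoc (a :: as) x hne
    have hP := peakOf_snoc (a :: as) x hne
    have hS := SR_snoc (a :: as) x hne
    by_cases hgt : x > (a :: as).getLastD 0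
    · rw [if_pos hgt] at hU hP
      rw [if_pos hgt] at hS
      simp only [stepB, if_pos hgt]
      rw [hLast, hU, getLastD_snoc, hD, if_neg (by omega), hP, hS]
      norm_num
    · by_cases heq : x = (a :: as).getLastD 0
      · rw [if_neg hgt] at hU hP
        rw [if_neg hgt] at hS
        rw [if_pos heq] at hP hS
        simp only [stepB, if_neg (by omega : ¬ x > (a :: as).getLastD 0), if_pos heq]
        rw [hLast, hU, getLastD_snoc, hD, if_neg (by omega), hP, hS]
        norm_num
      · rw [if_neg hgt] at hU hP
        rw [if_neg hgt] at hS
        rw [if_neg heq] at hP hS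
        simp only [stepB, if_neg (by omega : ¬ x > (a :: as).getLastD 0), if_neg heq]
        rw [hLast, hU, getLastD_snoc, hD, if_pos (show x < (a :: as).getLastD 0 by omega), hP, hS]
        simp only [Prod.mk.injEq]
        and_intros <;> push_cast <;> ring

-- ===== VERDICT (by name: the statement is the Claim_ definition above) =====
theorem salary_spec : Claim_equal_salary := by
  intro r _
  unfold Spec_salary
  cases r with
  | nil => rfl
  | cons a as =>
    rw [salary_eq_finals, sum_zip_eq_SR]
    show SR (a :: as) = salary_alt (a :: as)
    simp only [salary_alt, foldB_inv]
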